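-- pv_equiv track=rewrite | github.com/lab57/DQCComparison | DISQCO/src/disqco/graphs/quantum_network.py | network_of_grids
-- ===== SOURCE A (Python) =====
-- import math as mt
--
-- def grid_coupling(N):
--     """
--     Create an adjacency list for a grid-like connection of N nodes.
--
--     If N is a perfect square, it uses sqrt(N) x sqrt(N).
--     Otherwise, it finds rows x cols such that rows * cols >= N
--     and arranges the nodes accordingly.
--
--     Returns:
--         A list of edges in the format [[node1, node2], ...].
--     """
--     # Compute (approx) number of rows and columns
--     root = int(mt.isqrt(N))  # isqrt gives the integer sqrt floor
--     if root * root == N: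
--         rows, cols = root, root
--     else:
--         # We want rows * cols >= N, with rows ~ cols ~ sqrt(N)
--         # Simple approach: start with rows = int(sqrt(N)) and
--         # increment cols until rows * cols >= N.
--         rows = root
--         # One strategy: determine a minimal 'cols' so that rows * cols >= N
--         # If that doesn't work, increment rows as needed.
--         if rows * root >= N:
--             cols = root
--         else:
--             cols = root + 1
--             if rows * cols < N:  # Still not enough
--                 rows += 1
--
--     edges = []
--     node_index = lambda r, c: r * cols + c
--
--     for r in range(rows):
--         for c in range(cols):
--             current_node = node_index(r, c)
--             # Stop if we've reached all N nodes
--             if current_node >= N: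
--                 break
--
--             # Connect to the right neighbor if within bounds and within N
--             if c < cols - 1:
--                 right_node = node_index(r, c + 1)
--                 if right_node < N:
--                     edges.append([current_node, right_node])
--
--             # Connect to the bottom neighbor if within bounds and within N
--             if r < rows - 1:
--                 bottom_node = node_index(r + 1, c)
--                 if bottom_node < N:
--                     edges.append([current_node, bottom_node])
--
--     return edges
--
-- def network_of_grids(num_grids, nodes_per_grid, l):
--     """
--     Construct a network of grid graphs connected by linear paths.
--
--     Args:
--         num_grids (int): Number of grid components.
--         nodes_per_grid (int): Number of nodes in each grid.
--         l (int): Number of hops (edges) in the path connecting consecutive grids.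
--
--     Returns:
--         List of edges across the entire network.
--     """
--     all_edges = []
--     node_counter = 0
--     grid_centers = []
--
--     for i in range(num_grids):
--         # Generate grid edges
--         grid_edges = grid_coupling(nodes_per_grid)
--         # Offset node indices
--         offset_edges = [[u + node_counter, v + node_counter] for u, v in grid_edges]
--         all_edges.extend(offset_edges)
--
--         # Track a "center" node in the grid to connect bridges (we'll use node 0 of each grid)
--         grid_centers.append(node_counter)  # could also pick a more central node
--         node_counter += nodes_per_grid
--
--         # Add l-hop path to next grid (if not the last grid)
--         if i < num_grids - 1:
--             bridge_edges = []
--             path_start = grid_centers[-1]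
--             bridge_nodes = [node_counter + j for j in range(l)]
--             path_nodes = [path_start] + bridge_nodes
--
--             for u, v in zip(path_nodes, path_nodes[1:]):
--                 bridge_edges.append([u, v])
--             all_edges.extend(bridge_edges)
--
--             node_counter += l  # reserve node indices for bridge
--
--     return all_edges
-- ===== SOURCE B (Python) =====
-- import math as mt
--
-- def _merge(a, b):
--     """Merge two lists of edge pairs, each sorted in lexicographic order."""
--     out = []
--     i, j = 0, 0
--     while i < len(a) and j < len(b):
--         if a[i] <= b[j]:
--             out.append(a[i]); i += 1
--         else:
--             out.append(b[j]); j += 1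
--     out.extend(a[i:])
--     out.extend(b[j:])
--     return out
--
-- def network_of_grids(num_grids, nodes_per_grid, l):
--     if num_grids <= 0:
--         return []
--     N = nodes_per_grid
--     root = mt.isqrt(N)
--     cols = root if root * root == N else root + 1
--     # horizontal and vertical grid edges, generated as two separate sorted streams
--     right = [(i, i + 1) for i in range(max(N - 1, 0)) if (i + 1) % cols != 0]
--     down = [(i, i + cols) for i in range(max(N - cols, 0))]
--     grid = _merge(right, down)
--     stride = N + l
--     out = []
--     for g in range(num_grids):
--         base = g * stride
--         out.extend([u + base, v + base] for u, v in grid)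
--         if g < num_grids - 1:
--             out.extend([base if j == 0 else base + N + j - 1, base + N + j] for j in range(l))
--     return out
-- ===== Notes on version B (the rewrite author's own statement) =====
-- stated objective: alternative
-- what changed: grid edges are produced as two separate sorted streams (horizontal edges filtered by (i+1)%cols, vertical edges over range(N-cols)) combined by a two-pointer merge on lexicographic pair order, instead of A's rows*cols derivation with a nested (r,c) loop and break; the outer network loop drops A's node_counter/grid_centers state for a closed-form base=g*(N+l) and emits bridge edges by direct index formula instead of building a path list and zipping it.
import Mathlib
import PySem

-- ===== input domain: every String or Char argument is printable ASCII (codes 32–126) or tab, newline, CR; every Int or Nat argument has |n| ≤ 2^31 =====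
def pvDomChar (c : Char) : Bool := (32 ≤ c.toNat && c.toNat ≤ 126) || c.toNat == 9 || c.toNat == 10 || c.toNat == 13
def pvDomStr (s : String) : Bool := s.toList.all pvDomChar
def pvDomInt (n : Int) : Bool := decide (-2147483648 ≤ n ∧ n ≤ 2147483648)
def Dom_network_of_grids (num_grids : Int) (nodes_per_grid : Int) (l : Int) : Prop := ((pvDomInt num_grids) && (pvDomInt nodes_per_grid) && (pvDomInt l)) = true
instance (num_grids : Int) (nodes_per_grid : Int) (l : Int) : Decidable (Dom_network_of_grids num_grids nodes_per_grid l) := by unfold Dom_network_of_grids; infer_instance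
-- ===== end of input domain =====

-- B builds each grid's edge list as TWO separate sorted comprehensions (horizontal,
-- vertical) combined by a two-pointer merge, in place of A's rows×cols nested loop
-- with break; the outer loop uses a closed-form offset g*(N+l) and index-formula
-- bridges instead of A's node_counter/grid_centers state and zipped path list.
-- Objective: alternative decomposition. Neither function mutates its arguments.

-- ===== PORT A =====
-- int(mt.isqrt(N)): Python's math.isqrt is exactly Nat.sqrt for N ≥ 0;
-- for N < 0 it raises ValueError, which Pre_ excludes.
def pyIsqrt (N : Int) : Int := (Nat.sqrt N.toNat : Int)

-- inner 'for c in range(cols)' loop of grid_coupling, with its break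
def gcInner (N rows cols r : Int) : List Int → List (List Int) → List (List Int)
  | [], edges => edges
  | c :: cs, edges =>
    let current := r * cols + c
    if current ≥ N then edges   -- 'break': the rest of the row is skipped
    else
      let edges := if c < cols - 1 then
          (if r * cols + (c + 1) < N then edges ++ [[current, r * cols + (c + 1)]] else edges)
        else edges
      let edges := if r < rows - 1 then
          (if (r + 1) * cols + c < N then edges ++ [[current, (r + 1) * cols + c]] else edges)
        else edges
      gcInner N rows cols r cs edges

def grid_coupling (N : Int) : List (List Int) :=
  let root := pyIsqrt N
  let rc : Int × Int :=
    if root * root = N then (root, root)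
    else
      let rows := root
      if rows * root ≥ N then (rows, root)
      else
        let cols := root + 1
        if rows * cols < N then (rows + 1, cols) else (rows, cols)
  let rows := rc.1
  let cols := rc.2
  (PySem.List.pyRange 0 rows 1).foldl
    (fun edges r => gcInner N rows cols r (PySem.List.pyRange 0 cols 1) edges) []

-- body of A's 'for i in range(num_grids)' loop; state = (all_edges, node_counter, grid_centers)
def netStepA (num_grids nodes_per_grid l : Int)
    (st : List (List Int) × Int × List Int) (i : Int) : List (List Int) × Int × List Int :=
  let all_edges := st.1
  let node_counter := st.2.1
  let grid_centers := st.2.2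
  let grid_edges := grid_coupling nodes_per_grid
  -- [[u + node_counter, v + node_counter] for u, v in grid_edges]
  let offset_edges := grid_edges.map (fun e =>
    match e with
    | [u, v] => [u + node_counter, v + node_counter]
    | _ => [])   -- unreachable: grid_coupling emits only 2-lists
  let all_edges := all_edges ++ offset_edges
  let grid_centers := grid_centers ++ [node_counter]
  let node_counter := node_counter + nodes_per_grid
  if i < num_grids - 1 then
    -- path_start = grid_centers[-1]; the list is nonempty here, so getD is never used
    let path_start := (PySem.List.pyGet? grid_centers (-1)).getD 0
    let bridge_nodes := (PySem.List.pyRange 0 l 1).map (fun j => node_counter + j)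
    let path_nodes := path_start :: bridge_nodes
    -- zip(path_nodes, path_nodes[1:]); [1:] on a list is drop 1
    let bridge_edges := (path_nodes.zip (path_nodes.drop 1)).map (fun p => [p.1, p.2])
    (all_edges ++ bridge_edges, node_counter + l, grid_centers)
  else
    (all_edges, node_counter, grid_centers)

def network_of_grids (num_grids : Int) (nodes_per_grid : Int) (l : Int) : List (List Int) :=
  ((PySem.List.pyRange 0 num_grids 1).foldl
    (netStepA num_grids nodes_per_grid l) ([], 0, [])).1

-- ===== PORT B =====
-- Python tuple '<=' on int pairs (lexicographic)
def pairLe (p q : Int × Int) : Bool :=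
  decide (p.1 < q.1) || (decide (p.1 = q.1) && decide (p.2 ≤ q.2))

-- _merge's index walk (i over a, j over b), as the same walk over the suffixes
def mergeB : List (Int × Int) → List (Int × Int) → List (Int × Int)
  | [], b => b
  | x :: a, [] => x :: a
  | x :: a, y :: b => if pairLe x y then x :: mergeB a (y :: b) else y :: mergeB (x :: a) b

-- right/down comprehensions and the merge from B's body
def gridEdgesB (N : Int) : List (Int × Int) :=
  let root := pyIsqrt N
  let cols := if root * root = N then root else root + 1
  mergeB
    (((PySem.List.pyRange 0 (max (N - 1) 0) 1).filter
        (fun i => decide (PySem.Int.mod (i + 1) cols ≠ 0))).map (fun i => (i, i + 1)))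
    ((PySem.List.pyRange 0 (max (N - cols) 0) 1).map (fun i => (i, i + cols)))

-- body of B's 'for g in range(num_grids)' loop
def netStepB (num_grids nodes_per_grid l : Int) (grid : List (Int × Int))
    (edges : List (List Int)) (g : Int) : List (List Int) :=
  let base := g * (nodes_per_grid + l)
  let edges := edges ++ grid.map (fun p => [p.1 + base, p.2 + base])
  if g < num_grids - 1 then
    edges ++ (PySem.List.pyRange 0 l 1).map (fun j =>
      [if j = 0 then base else base + nodes_per_grid + j - 1, base + nodes_per_grid + j])
  else edges

def network_of_grids_alt (num_grids : Int) (nodes_per_grid : Int) (l : Int) : List (List Int) :=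
  if num_grids ≤ 0 then []
  else
    (PySem.List.pyRange 0 num_grids 1).foldl
      (netStepB num_grids nodes_per_grid l (gridEdgesB nodes_per_grid)) []

-- ===== PRECONDITION & SPEC =====
-- Pre_ excludes exactly the inputs where Python A raises: num_grids ≥ 1 with
-- nodes_per_grid < 0 makes math.isqrt(nodes_per_grid) raise ValueError.
def Pre_network_of_grids (num_grids : Int) (nodes_per_grid : Int) (l : Int) : Prop :=
  0 ≤ nodes_per_grid ∨ num_grids ≤ 0
instance (num_grids : Int) (nodes_per_grid : Int) (l : Int) : Decidable (Pre_network_of_grids num_grids nodes_per_grid l) := by unfold Pre_network_of_grids; infer_instance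
def pvWitness_network_of_grids : Int × Int × Int := (3, 5, 2)

def Spec_network_of_grids (num_grids : Int) (nodes_per_grid : Int) (l : Int) (out : List (List Int)) : Prop := out = network_of_grids_alt num_grids nodes_per_grid l
instance (num_grids : Int) (nodes_per_grid : Int) (l : Int) (out : List (List Int)) : Decidable (Spec_network_of_grids num_grids nodes_per_grid l out) := by unfold Spec_network_of_grids; infer_instance

-- ===== CLAIM (what is proved, stated in full; the proofs are below) =====
def Claim_equal_network_of_grids : Prop := ∀ (num_grids : Int) (nodes_per_grid : Int) (l : Int), Dom_network_of_grids num_grids nodes_per_grid l → Pre_network_of_grids num_grids nodes_per_grid l → Spec_network_of_grids num_grids nodes_per_grid l (network_of_grids num_grids nodes_per_grid l)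

-- ===== LEMMAS AND PROOFS =====

-- proof-side bookkeeping: the node-major interleaving of right/down edges
def gridTemplateLoop (N cols : Int) : List Int → List (Int × Int) → List (Int × Int)
  | [], acc => acc
  | i :: is, acc =>
    let acc := if PySem.Int.mod (i + 1) cols ≠ 0 ∧ i + 1 < N then acc ++ [(i, i + 1)] else acc
    let acc := if i + cols < N then acc ++ [(i, i + cols)] else acc
    gridTemplateLoop N cols is acc

-- accumulator-append lemmas for the hand-written loops
theorem gcInner_acc (N rows cols r : Int) (cs : List Int) :
    ∀ (E X : List (List Int)), gcInner N rows cols r cs (E ++ X) = E ++ gcInner N rows cols r cs X := by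
  induction cs with
  | nil => intro E X; simp [gcInner]
  | cons c cs ih =>
    intro E X
    simp only [gcInner]
    split_ifs <;> (try simp only [List.append_assoc]) <;> first | rfl | exact ih E _

theorem gcInner_append (N rows cols r : Int) (cs : List Int) (E : List (List Int)) :
    gcInner N rows cols r cs E = E ++ gcInner N rows cols r cs [] := by
  simpa using gcInner_acc N rows cols r cs E []

theorem gridTemplateLoop_acc (N cols : Int) (is : List Int) :
    ∀ (E X : List (Int × Int)), gridTemplateLoop N cols is (E ++ X) = E ++ gridTemplateLoop N cols is X := by
  induction is with
  | nil => intro E X; simp [gridTemplateLoop]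
  | cons i is ih =>
    intro E X
    simp only [gridTemplateLoop]
    split_ifs <;> (try simp only [List.append_assoc]) <;> first | rfl | exact ih E _

theorem gridTemplateLoop_append (N cols : Int) (is : List Int) (E : List (Int × Int)) :
    gridTemplateLoop N cols is E = E ++ gridTemplateLoop N cols is [] := by
  simpa using gridTemplateLoop_acc N cols is E []

-- one row of A's grid loop equals one cols-sized segment of the interleaving
theorem row_eq (N rows cols r : Int) (hc : 0 < cols) (hN : N ≤ rows * cols) :
    ∀ (n : Nat) (c₀ : Int), 0 ≤ c₀ → (cols - c₀).toNat ≤ n →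
      gcInner N rows cols r (PySem.List.pyRange c₀ cols 1) [] =
        (gridTemplateLoop N cols
            (PySem.List.pyRange (r * cols + c₀) (min ((r + 1) * cols) N) 1) []).map
          (fun p => [p.1, p.2]) := by
  intro n
  induction n with
  | zero =>
    intro c₀ h0 hn
    have hcc : cols ≤ c₀ := by omega
    have h1 : (r + 1) * cols = r * cols + cols := by ring
    rw [PySem.List.pyRange_one_eq_nil hcc, PySem.List.pyRange_one_eq_nil (by omega)]
    simp [gcInner, gridTemplateLoop]
  | succ n ih =>
    intro c₀ h0 hn
    by_cases hcc : cols ≤ c₀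
    · have h1 : (r + 1) * cols = r * cols + cols := by ring
      rw [PySem.List.pyRange_one_eq_nil hcc, PySem.List.pyRange_one_eq_nil (by omega)]
      simp [gcInner, gridTemplateLoop]
    · push_neg at hcc
      rw [PySem.List.pyRange_one_cons hcc]
      by_cases hcur : r * cols + c₀ ≥ N
      · -- break: the rest of the row is ≥ N, and the interleaving segment is empty
        have hmin : min ((r + 1) * cols) N ≤ r * cols + c₀ := by omega
        rw [PySem.List.pyRange_one_eq_nil hmin]
        simp [gcInner, hcur, gridTemplateLoop]
      · push_neg at hcur
        have hlt : r * cols + c₀ < (r + 1) * cols := by nlinarith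
        rw [PySem.List.pyRange_one_cons (by omega : r * cols + c₀ < min ((r + 1) * cols) N)]
        -- the right-neighbour test (i+1) % cols ≠ 0 is A's c < cols - 1
        have hmod : PySem.Int.mod (r * cols + c₀ + 1) cols = (c₀ + 1) % cols := by
          rw [PySem.Int.mod_eq_emod_of_pos hc]
          have : r * cols + c₀ + 1 = (c₀ + 1) + cols * r := by ring
          rw [this, Int.add_mul_emod_self_left]
        have hmodiff : (PySem.Int.mod (r * cols + c₀ + 1) cols ≠ 0) ↔ c₀ < cols - 1 := by
          rw [hmod]
          constructor
          · intro h
            by_contra hh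
            have : c₀ + 1 = cols := by omega
            rw [this] at h
            exact h Int.emod_self
          · intro h
            rw [Int.emod_eq_of_lt (by omega) (by omega)]
            omega
        -- the down test i + cols < N forces A's r < rows - 1
        have hbot : (r + 1) * cols + c₀ < N → r < rows - 1 := by
          intro h
          by_contra hh
          push_neg at hh
          have : rows * cols ≤ (r + 1) * cols := by nlinarith
          omega
        simp only [gcInner, gridTemplateLoop, if_neg (not_le.mpr hcur)]
        by_cases h1 : c₀ < cols - 1 <;> by_cases h2 : r * cols + (c₀ + 1) < N <;>
          by_cases h4 : (r + 1) * cols + c₀ < N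
        all_goals (
          have e1 : r * cols + c₀ + 1 = r * cols + (c₀ + 1) := by ring
          have e2 : r * cols + c₀ + cols = (r + 1) * cols + c₀ := by ring
          have hrec := ih (c₀ + 1) (by omega) (by omega)
          rw [gcInner_append, gridTemplateLoop_append, e1, hrec, List.map_append]
          have hm2 := hmodiff
          rw [e1] at hm2
          congr 1
          by_cases h3 : r < rows - 1 <;>
            first
              | exact absurd (hbot (by assumption)) (by assumption)
              | simp [hm2, h1, h2, h4, h3, e2])

-- sequential processing of a concatenated index list
theorem gridTemplateLoop_concat (N cols : Int) (xs ys : List Int) (A : List (Int × Int)) :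
    gridTemplateLoop N cols (xs ++ ys) A = gridTemplateLoop N cols ys (gridTemplateLoop N cols xs A) := by
  induction xs generalizing A with
  | nil => simp [gridTemplateLoop]
  | cons x xs ih =>
    simp only [List.cons_append, gridTemplateLoop]
    exact ih _

-- A's whole rows×cols loop equals the flat interleaving over the remaining node indices
theorem outer_eq (N rows cols : Int) (hc : 0 < cols) (hN : N ≤ rows * cols)
    (hlast : (rows - 1) * cols < N) :
    ∀ (n : Nat) (r₀ : Int), 0 ≤ r₀ → (rows - r₀).toNat ≤ n → ∀ E : List (List Int),
      (PySem.List.pyRange r₀ rows 1).foldl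
          (fun edges r => gcInner N rows cols r (PySem.List.pyRange 0 cols 1) edges) E =
        E ++ (gridTemplateLoop N cols (PySem.List.pyRange (min (r₀ * cols) N) N 1) []).map
          (fun p => [p.1, p.2]) := by
  intro n
  induction n with
  | zero =>
    intro r₀ h0 hn E
    have hge : rows ≤ r₀ := by omega
    have hNr : N ≤ r₀ * cols := by nlinarith
    have hm : min (r₀ * cols) N = N := by omega
    rw [PySem.List.pyRange_one_eq_nil hge, hm, PySem.List.pyRange_one_eq_nil le_rfl]
    simp [gridTemplateLoop]
  | succ n ih =>
    intro r₀ h0 hn E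
    by_cases hge : rows ≤ r₀
    · have hNr : N ≤ r₀ * cols := by nlinarith
      have hm : min (r₀ * cols) N = N := by omega
      rw [PySem.List.pyRange_one_eq_nil hge, hm, PySem.List.pyRange_one_eq_nil le_rfl]
      simp [gridTemplateLoop]
    · push_neg at hge
      have hrc : r₀ * cols ≤ (rows - 1) * cols := by nlinarith
      have hmin : min (r₀ * cols) N = r₀ * cols := by omega
      have hrow := row_eq N rows cols r₀ hc hN cols.toNat 0 le_rfl (by simp)
      rw [add_zero] at hrow
      have hstep : r₀ * cols ≤ min ((r₀ + 1) * cols) N := by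
        have : r₀ * cols ≤ (r₀ + 1) * cols := by nlinarith
        omega
      rw [PySem.List.pyRange_one_cons hge, List.foldl_cons, gcInner_append, hrow,
        ih (r₀ + 1) (by omega) (by omega), hmin,
        PySem.List.pyRange_one_append (r₀ * cols) (min ((r₀ + 1) * cols) N) N hstep (by omega),
        gridTemplateLoop_concat,
        gridTemplateLoop_append N cols _
          (gridTemplateLoop N cols (PySem.List.pyRange (r₀ * cols) (min ((r₀ + 1) * cols) N) 1) []),
        List.map_append]
      simp [List.append_assoc]

-- merge facts
theorem mergeB_nil_right (a : List (Int × Int)) : mergeB a [] = a := by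
  cases a <;> simp [mergeB]

theorem mergeB_cons_right (a : List (Int × Int)) (y : Int × Int) (b : List (Int × Int))
    (h : ∀ z ∈ a, pairLe z y = false) : mergeB a (y :: b) = y :: mergeB a b := by
  cases a with
  | nil => simp [mergeB]
  | cons z a' => simp [mergeB, h z (by simp)]

theorem pairLe_false_of_lt (z y : Int × Int) (h : y.1 < z.1) : pairLe z y = false := by
  simp only [pairLe, Bool.or_eq_false_iff, Bool.and_eq_false_iff, decide_eq_false_iff_not]
  omega

theorem memR_fst (i M : Int) (cols : Int) (z : Int × Int)
    (h : z ∈ ((PySem.List.pyRange i M 1).filter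
        (fun w => decide (PySem.Int.mod (w + 1) cols ≠ 0))).map (fun w => (w, w + 1))) :
    i ≤ z.1 := by
  simp only [List.mem_map, List.mem_filter] at h
  obtain ⟨w, ⟨hw, _⟩, rfl⟩ := h
  exact (PySem.List.mem_pyRange_one.mp hw).1

-- B's merge of the two sorted streams is the node-major interleaving
theorem merge_eq (N cols : Int) (hc : 0 < cols) :
    ∀ (n : Nat) (i₀ : Int), 0 ≤ i₀ → (N - i₀).toNat ≤ n →
      mergeB
          (((PySem.List.pyRange i₀ (max (N - 1) 0) 1).filter
              (fun i => decide (PySem.Int.mod (i + 1) cols ≠ 0))).map (fun i => (i, i + 1)))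
          ((PySem.List.pyRange i₀ (max (N - cols) 0) 1).map (fun i => (i, i + cols))) =
        gridTemplateLoop N cols (PySem.List.pyRange i₀ N 1) [] := by
  intro n
  induction n with
  | zero =>
    intro i₀ h0 hn
    rw [PySem.List.pyRange_one_eq_nil (by omega : max (N - 1) 0 ≤ i₀),
      PySem.List.pyRange_one_eq_nil (by omega : max (N - cols) 0 ≤ i₀),
      PySem.List.pyRange_one_eq_nil (by omega : N ≤ i₀)]
    simp [mergeB, gridTemplateLoop]
  | succ n ih =>
    intro i₀ h0 hn
    by_cases hge : N ≤ i₀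
    · rw [PySem.List.pyRange_one_eq_nil (by omega : max (N - 1) 0 ≤ i₀),
        PySem.List.pyRange_one_eq_nil (by omega : max (N - cols) 0 ≤ i₀),
        PySem.List.pyRange_one_eq_nil hge]
      simp [mergeB, gridTemplateLoop]
    · push_neg at hge
      have hIH := ih (i₀ + 1) (by omega) (by omega)
      rw [PySem.List.pyRange_one_cons hge]
      simp only [gridTemplateLoop]
      rw [gridTemplateLoop_append]
      by_cases hR : i₀ + 1 < N
      · rw [PySem.List.pyRange_one_cons (by omega : i₀ < max (N - 1) 0), List.filter_cons]
        by_cases hm : PySem.Int.mod (i₀ + 1) cols = 0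
        · -- no right edge at i₀
          simp only [hm, ne_eq, not_true_eq_false, decide_false, Bool.false_eq_true, if_false]
          by_cases hD : i₀ + cols < N
          · rw [PySem.List.pyRange_one_cons (by omega : i₀ < max (N - cols) 0), List.map_cons]
            rw [mergeB_cons_right _ _ _ (fun z hz => pairLe_false_of_lt z _ (by
              have := memR_fst (i₀ + 1) (max (N - 1) 0) cols z hz; simp; omega))]
            rw [hIH]
            simp [hD]
          · rw [PySem.List.pyRange_one_eq_nil (by omega : max (N - cols) 0 ≤ i₀),
              PySem.List.pyRange_one_eq_nil (by omega : max (N - cols) 0 ≤ i₀ + 1)] at *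
            rw [hIH]
            simp [hD]
        · -- right edge present
          simp only [hm, ne_eq, decide_true, not_false_eq_true, if_true, List.map_cons]
          by_cases hD : i₀ + cols < N
          · rw [PySem.List.pyRange_one_cons (by omega : i₀ < max (N - cols) 0), List.map_cons]
            have h1 : pairLe (i₀, i₀ + 1) (i₀, i₀ + cols) = true := by
              simp only [pairLe]; simp; omega
            simp only [mergeB, h1, if_true]
            rw [mergeB_cons_right _ _ _ (fun z hz => pairLe_false_of_lt z _ (by
              have := memR_fst (i₀ + 1) (max (N - 1) 0) cols z hz; simp; omega))]
            rw [hIH]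
            simp [hR, hD]
          · rw [PySem.List.pyRange_one_eq_nil (by omega : max (N - cols) 0 ≤ i₀),
              PySem.List.pyRange_one_eq_nil (by omega : max (N - cols) 0 ≤ i₀ + 1)] at *
            simp only [List.map_nil] at hIH ⊢
            rw [mergeB_nil_right] at hIH ⊢
            rw [hIH]
            simp [hR, hD]
      · -- i₀ = N - 1 (since i₀ < N): no right edge, and no down edge since cols ≥ 1
        have hD : ¬ i₀ + cols < N := by omega
        rw [PySem.List.pyRange_one_eq_nil (by omega : max (N - 1) 0 ≤ i₀),
          PySem.List.pyRange_one_eq_nil (by omega : max (N - 1) 0 ≤ i₀ + 1)] at *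
        rw [PySem.List.pyRange_one_eq_nil (by omega : max (N - cols) 0 ≤ i₀),
          PySem.List.pyRange_one_eq_nil (by omega : max (N - cols) 0 ≤ i₀ + 1)] at *
        simp only [List.filter_nil, List.map_nil] at hIH ⊢
        rw [hIH]
        simp [hR, hD]

-- A's whole grid edge list is B's merged edge list, pair-to-list
theorem grid_eq (N : Int) (hN : 0 ≤ N) :
    grid_coupling N = (gridEdgesB N).map (fun p => [p.1, p.2]) := by
  rcases lt_or_eq_of_le hN with hpos | h0
  swap
  · rw [← h0]
    simp [grid_coupling, gridEdgesB, mergeB, pyIsqrt,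
      PySem.List.pyRange_one_eq_nil (le_refl (0 : Int))]
  · have hNt : (N.toNat : Int) = N := Int.toNat_of_nonneg hN
    have h3 : 0 ≤ pyIsqrt N := Int.natCast_nonneg _
    have h1 : pyIsqrt N * pyIsqrt N ≤ N := by
      have := Nat.sqrt_le' N.toNat
      unfold pyIsqrt
      rw [pow_two] at this
      exact_mod_cast hNt ▸ (by exact_mod_cast this : ((Nat.sqrt N.toNat * Nat.sqrt N.toNat : Nat) : Int) ≤ (N.toNat : Int))
    have h2 : N < (pyIsqrt N + 1) * (pyIsqrt N + 1) := by
      have := Nat.lt_succ_sqrt' N.toNat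
      unfold pyIsqrt
      rw [pow_two] at this
      have hc : ((N.toNat : Nat) : Int) < ((Nat.sqrt N.toNat + 1) * (Nat.sqrt N.toNat + 1) : Nat) := by exact_mod_cast this
      rw [hNt] at hc
      push_cast at hc
      exact hc
    by_cases hsq : pyIsqrt N * pyIsqrt N = N
    · have hc : 0 < pyIsqrt N := by nlinarith
      have hmin0 : min ((0 : Int) * pyIsqrt N) N = 0 := by
        rw [zero_mul]; omega
      simp only [grid_coupling, gridEdgesB, if_pos hsq]
      rw [outer_eq N (pyIsqrt N) (pyIsqrt N) hc (le_of_eq hsq.symm) (by nlinarith)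
        (pyIsqrt N).toNat 0 le_rfl (by omega) [], hmin0,
        ← merge_eq N (pyIsqrt N) hc N.toNat 0 le_rfl (by omega)]
      simp
    · have hlt : pyIsqrt N * pyIsqrt N < N := lt_of_le_of_ne h1 hsq
      have hbranch : ¬ (pyIsqrt N * pyIsqrt N ≥ N) := by omega
      simp only [grid_coupling, gridEdgesB, if_neg hsq, if_neg hbranch]
      by_cases hs2 : pyIsqrt N * (pyIsqrt N + 1) < N
      · have hmin0 : min ((0 : Int) * (pyIsqrt N + 1)) N = 0 := by rw [zero_mul]; omega
        simp only [if_pos hs2]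
        rw [outer_eq N (pyIsqrt N + 1) (pyIsqrt N + 1) (by omega) (by nlinarith) (by nlinarith)
          (pyIsqrt N + 1).toNat 0 le_rfl (by omega) [], hmin0,
          ← merge_eq N (pyIsqrt N + 1) (by omega) N.toNat 0 le_rfl (by omega)]
        simp
      · push_neg at hs2
        have hmin0 : min ((0 : Int) * (pyIsqrt N + 1)) N = 0 := by rw [zero_mul]; omega
        simp only [if_neg (not_lt.mpr hs2)]
        rw [outer_eq N (pyIsqrt N) (pyIsqrt N + 1) (by omega) hs2 (by nlinarith)
          (pyIsqrt N).toNat 0 le_rfl (by omega) [], hmin0,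
          ← merge_eq N (pyIsqrt N + 1) (by omega) N.toNat 0 le_rfl (by omega)]
        simp

-- consecutive pairs of an arithmetic range, zipped vs indexed
theorem consec_aux (c b : Int) :
    ∀ (n : Nat) (a : Int), (b - a).toNat ≤ n →
    ((((PySem.List.pyRange a b 1).map (fun j => c + j)).zip
        (((PySem.List.pyRange a b 1).map (fun j => c + j)).drop 1)).map (fun p => [p.1, p.2])) =
      (PySem.List.pyRange (a + 1) b 1).map (fun j => [c + j - 1, c + j]) := by
  intro n
  induction n with
  | zero =>
    intro a hn
    rw [PySem.List.pyRange_one_eq_nil (by omega : b ≤ a),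
      PySem.List.pyRange_one_eq_nil (by omega : b ≤ a + 1)]
    simp
  | succ n ih =>
    intro a hn
    by_cases hab : a < b
    · rw [PySem.List.pyRange_one_cons hab]
      by_cases hab1 : a + 1 < b
      · have hIH := ih (a + 1) (by omega)
        rw [PySem.List.pyRange_one_cons hab1] at hIH ⊢
        simp only [List.map_cons, List.drop_succ_cons, List.drop_zero,
          List.zip_cons_cons, List.map_cons] at hIH ⊢
        rw [hIH]
        have h : c + (a + 1) - 1 = c + a := by ring
        rw [h]
      · rw [PySem.List.pyRange_one_eq_nil (by omega : b ≤ a + 1)]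
        simp
    · rw [PySem.List.pyRange_one_eq_nil (by omega : b ≤ a),
        PySem.List.pyRange_one_eq_nil (by omega : b ≤ a + 1)]
      simp

theorem consec_pairs (c a b : Int) :
    ((((PySem.List.pyRange a b 1).map (fun j => c + j)).zip
        (((PySem.List.pyRange a b 1).map (fun j => c + j)).drop 1)).map (fun p => [p.1, p.2])) =
      (PySem.List.pyRange (a + 1) b 1).map (fun j => [c + j - 1, c + j]) :=
  consec_aux c b (b - a).toNat a le_rfl

-- A's zipped path list equals B's index-formula bridge
theorem bridge_eq (base N l : Int) :
    (((base :: (PySem.List.pyRange 0 l 1).map (fun j => base + N + j)).zip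
        ((base :: (PySem.List.pyRange 0 l 1).map (fun j => base + N + j)).drop 1)).map
      (fun p => [p.1, p.2])) =
      (PySem.List.pyRange 0 l 1).map (fun j =>
        [if j = 0 then base else base + N + j - 1, base + N + j]) := by
  by_cases hl : 0 < l
  · rw [PySem.List.pyRange_one_cons hl]
    simp only [List.map_cons, List.drop_succ_cons, List.drop_zero, List.zip_cons_cons,
      List.map_cons]
    have hdrop : (List.map (fun j => base + N + j) (PySem.List.pyRange (0 + 1) l 1)) =
        (List.map (fun j => base + N + j) (PySem.List.pyRange 0 l 1)).drop 1 := by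
      rw [PySem.List.pyRange_one_cons hl]
      simp
    rw [hdrop]
    have hfold : ((base + N + 0) ::
        (List.map (fun j => base + N + j) (PySem.List.pyRange 0 l 1)).drop 1) =
        List.map (fun j => base + N + j) (PySem.List.pyRange 0 l 1) := by
      rw [PySem.List.pyRange_one_cons hl]
      simp
    rw [hfold, consec_pairs (base + N) 0 l]
    refine List.cons_eq_cons.mpr ⟨by norm_num, ?_⟩
    refine List.map_congr_left ?_
    intro j hj
    have h1 := (PySem.List.mem_pyRange_one.mp hj).1
    rw [if_neg (by omega : ¬ j = 0)]
  · rw [PySem.List.pyRange_one_eq_nil (by omega : l ≤ 0)]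
    simp

-- the whole outer loop: A's fold with its (edges, counter, centers) state vs B's fold
theorem net_outer (G npg l : Int) (hn : 0 ≤ npg) :
    ∀ (n : Nat) (g₀ : Int), 0 ≤ g₀ → (G - g₀).toNat ≤ n →
      ∀ (E : List (List Int)) (centers : List Int),
        ((PySem.List.pyRange g₀ G 1).foldl (netStepA G npg l) (E, g₀ * (npg + l), centers)).1 =
          (PySem.List.pyRange g₀ G 1).foldl (netStepB G npg l (gridEdgesB npg)) E := by
  intro n
  induction n with
  | zero =>
    intro g₀ h0 hn' E centers
    rw [PySem.List.pyRange_one_eq_nil (by omega)]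
    simp
  | succ n ih =>
    intro g₀ h0 hn' E centers
    by_cases hge : G ≤ g₀
    · rw [PySem.List.pyRange_one_eq_nil hge]; simp
    · push_neg at hge
      have hoff : (grid_coupling npg).map (fun e =>
            match e with
            | [u, v] => [u + g₀ * (npg + l), v + g₀ * (npg + l)]
            | _ => ([] : List Int)) =
          (gridEdgesB npg).map (fun p => [p.1 + g₀ * (npg + l), p.2 + g₀ * (npg + l)]) := by
        rw [grid_eq npg hn, List.map_map]
        rfl
      rw [PySem.List.pyRange_one_cons hge]
      simp only [List.foldl_cons, netStepA, netStepB,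
        PySem.List.pyGet?_neg_one_append_singleton, Option.getD_some]
      by_cases hlast : g₀ < G - 1
      · simp only [if_pos hlast]
        have e : g₀ * (npg + l) + npg + l = (g₀ + 1) * (npg + l) := by ring
        rw [e, ih (g₀ + 1) (by omega) (by omega)]
        congr 1
        rw [bridge_eq (g₀ * (npg + l)) npg l, hoff]
      · simp only [if_neg hlast]
        rw [PySem.List.pyRange_one_eq_nil (by omega : G ≤ g₀ + 1)]
        simp [hoff]

-- ===== VERDICT (by name: the statement is the Claim_ definition above) =====
theorem network_of_grids_spec : Claim_equal_network_of_grids := by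
  unfold Claim_equal_network_of_grids
  intro G npg l hdom hpre
  unfold Spec_network_of_grids
  by_cases hG : G ≤ 0
  · simp [network_of_grids, network_of_grids_alt, PySem.List.pyRange_one_eq_nil hG, hG]
  · push_neg at hG
    have hn : 0 ≤ npg := by
      rcases hpre with h | h
      · exact h
      · omega
    have h := net_outer G npg l hn G.toNat 0 le_rfl (by omega) [] []
    rw [zero_mul] at h
    simp only [network_of_grids, network_of_grids_alt, if_neg (by omega : ¬ G ≤ 0)]
    exact h
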